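-- pv_equiv track=rewrite | github.com/bgaro/WriteUps | 2023/404CTF/programmation/Des mots, des mots, des mots/solve.py | shift_vowels_right
-- ===== SOURCE A (Python) =====
-- voyelles = "aeiouyAEIOUY"
--
-- def shift_vowels_right(entry):
--     voy_index = []
--     list_entry = list(entry)
--     for ind, char in enumerate(entry):
--         if char in voyelles:
--             voy_index.append(ind)
--
--     if len(voy_index) == 0:
--         return entry
--
--     last_voy = list_entry[voy_index[-1]]
--     for ind in range(len(voy_index) - 2, -1, -1):
--         list_entry[voy_index[ind + 1]] = list_entry[voy_index[ind]]
--     list_entry[voy_index[0]] = last_voy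
--     return "".join(list_entry)
-- ===== SOURCE B (Python) =====
-- voyelles = "aeiouyAEIOUY"
--
-- def shift_vowels_right(entry):
--     vows = [c for c in entry if c in voyelles]
--     if not vows:
--         return entry
--     rotated = iter([vows[-1]] + vows[:-1])
--     return "".join(next(rotated) if c in voyelles else c for c in entry)
-- ===== Notes on version B (the rewrite author's own statement) =====
-- stated objective: simpler
-- what changed: Replaces the index-list plus backward cascading in-place shift with extract-the-vowels, rotate the extracted list once, and a single forward pass that re-inserts the rotated vowels; no index arithmetic or mutation remains.
import Mathlib
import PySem

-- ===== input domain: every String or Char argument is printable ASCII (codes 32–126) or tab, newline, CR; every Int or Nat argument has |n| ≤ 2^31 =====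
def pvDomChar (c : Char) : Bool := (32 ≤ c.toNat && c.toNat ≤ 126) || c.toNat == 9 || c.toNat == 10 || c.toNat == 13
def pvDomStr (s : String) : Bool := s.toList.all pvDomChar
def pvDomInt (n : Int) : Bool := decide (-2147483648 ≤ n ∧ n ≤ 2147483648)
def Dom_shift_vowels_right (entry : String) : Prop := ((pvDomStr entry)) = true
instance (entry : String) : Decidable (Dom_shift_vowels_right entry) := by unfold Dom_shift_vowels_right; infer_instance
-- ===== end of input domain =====

-- B replaces A's index-list + backward cascading in-place shift by extract-rotate-reinsert
-- in a single forward pass (objective: simpler); return values proved equal on all inputs.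


-- ===== PORT A =====
def pyVoyelles : List Char := "aeiouyAEIOUY".toList

def shift_vowels_right (entry : String) : String :=
  let list_entry := entry.toList
  let voy_index : List Int :=
    (PySem.List.enumerate list_entry 0).foldl
      (fun acc p => if p.2 ∈ pyVoyelles then acc ++ [p.1] else acc) []
  if voy_index.length = 0 then entry
  else
    let last_voy := PySem.List.pyGetD list_entry (PySem.List.pyGetD voy_index (-1) 0) ' '
    let list_entry :=
      (PySem.List.pyRange ((voy_index.length : Int) - 2) (-1) (-1)).foldl
        (fun le ind =>
          PySem.List.pySetD le (PySem.List.pyGetD voy_index (ind + 1) 0)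
            (PySem.List.pyGetD le (PySem.List.pyGetD voy_index ind 0) ' '))
        list_entry
    let list_entry := PySem.List.pySetD list_entry (PySem.List.pyGetD voy_index 0 0) last_voy
    String.mk list_entry

-- ===== PORT B =====
-- 'next(rotated)' on the list iterator = consume the head of the remaining list;
-- the [] branch of the vowel case is unreachable (one rotated vowel per vowel position).
def fillVowels : List Char → List Char → List Char
  | [], _ => []
  | c :: cs, vs =>
    if c ∈ pyVoyelles then
      match vs with
      | v :: vt => v :: fillVowels cs vt
      | [] => c :: fillVowels cs []
    else c :: fillVowels cs vs

def shift_vowels_right_alt (entry : String) : String :=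
  let vows := entry.toList.filter (· ∈ pyVoyelles)
  if vows = [] then entry
  else
    let rotated := vows.getLastD ' ' :: vows.dropLast
    String.mk (fillVowels entry.toList rotated)

-- ===== PRECONDITION & SPEC =====
def Spec_shift_vowels_right (entry : String) (out : String) : Prop := out = shift_vowels_right_alt entry
instance (entry : String) (out : String) : Decidable (Spec_shift_vowels_right entry out) := by unfold Spec_shift_vowels_right; infer_instance

-- ===== CLAIM (what is proved, stated in full; the proofs are below) =====
def Claim_equal_shift_vowels_right : Prop := ∀ (entry : String), Dom_shift_vowels_right entry → Spec_shift_vowels_right entry (shift_vowels_right entry)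

-- ===== LEMMAS AND PROOFS =====

-- indices (0-based) of the vowels of a list, in increasing order
def vidx : List Char → List Nat
  | [] => []
  | c :: cs => if c ∈ pyVoyelles then 0 :: (vidx cs).map (· + 1) else (vidx cs).map (· + 1)

-- forward sequence of writes: positions js get values ws, head first
def writeAll : List Char → List Nat → List Char → List Char
  | st, j :: js, w :: ws => writeAll (st.set j w) js ws
  | st, _, _ => st

theorem length_vidx (l : List Char) :
    (vidx l).length = (l.filter (· ∈ pyVoyelles)).length := by
  induction l with
  | nil => rfl
  | cons c cs ih =>
    simp only [vidx, List.filter_cons]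
    by_cases h : c ∈ pyVoyelles <;> simp [h, ih]

theorem vidx_pairwise (l : List Char) : (vidx l).Pairwise (· < ·) := by
  induction l with
  | nil => exact List.Pairwise.nil
  | cons c cs ih =>
    have hmap : ((vidx cs).map (· + 1)).Pairwise (· < ·) := by
      exact List.pairwise_map.mpr (ih.imp (by omega))
    simp only [vidx]
    by_cases h : c ∈ pyVoyelles
    · simp only [h, if_pos]
      refine List.Pairwise.cons ?_ hmap
      intro x hx
      rcases List.mem_map.mp hx with ⟨y, _, rfl⟩
      omega
    · simpa [h] using hmap

theorem map_getD_vidx (l : List Char) :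
    (vidx l).map (fun i => l.getD i ' ') = l.filter (· ∈ pyVoyelles) := by
  induction l with
  | nil => rfl
  | cons c cs ih =>
    have hmap : ((vidx cs).map (· + 1)).map (fun i => (c :: cs).getD i ' ')
        = (vidx cs).map (fun i => cs.getD i ' ') := by
      rw [List.map_map]; rfl
    simp only [vidx, List.filter_cons]
    by_cases h : c ∈ pyVoyelles
    · simp only [h, if_pos, List.map_cons, decide_true]
      exact congrArg (fun t => (c :: cs).getD 0 ' ' :: t) (hmap.trans ih)
    · simpa [h] using hmap.trans ih

theorem enumerate_foldl_vidx (l : List Char) : ∀ (s : Int) (acc : List Int),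
    (PySem.List.enumerate l s).foldl
      (fun acc p => if p.2 ∈ pyVoyelles then acc ++ [p.1] else acc) acc
    = acc ++ (vidx l).map (fun j : Nat => s + (j : Int)) := by
  induction l with
  | nil => intro s acc; simp [PySem.List.enumerate_nil, vidx]
  | cons c cs ih =>
    intro s acc
    have hshift : ((vidx cs).map (· + 1)).map (fun j : Nat => s + (j : Int))
        = (vidx cs).map (fun j : Nat => (s + 1) + (j : Int)) := by
      rw [List.map_map]
      refine List.map_congr_left ?_
      intro j _
      show s + ((j + 1 : Nat) : Int) = (s + 1) + (j : Int)
      push_cast; ring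
    rw [PySem.List.enumerate_cons]
    simp only [vidx, List.foldl_cons]
    by_cases h : c ∈ pyVoyelles
    · simp only [h, if_pos, List.map_cons]
      rw [ih (s + 1) (acc ++ [s])]
      simp [hshift]
    · simp only [h, if_neg, ite_false]
      rw [ih (s + 1) acc, hshift]

-- pointwise form of map_getD_vidx
theorem getD_vidx_getD (l : List Char) (k : Nat) (hk : k < (vidx l).length) :
    l.getD ((vidx l).getD k 0) ' ' = (l.filter (· ∈ pyVoyelles)).getD k ' ' := by
  have h := map_getD_vidx l
  have hk2 : k < ((vidx l).map (fun i => l.getD i ' ')).length := by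
    simpa using hk
  have e1 : l.getD ((vidx l).getD k 0) ' '
      = ((vidx l).map (fun i => l.getD i ' ')).getD k ' ' := by
    rw [List.getD_eq_getElem _ _ hk, List.getD_eq_getElem _ _ hk2, List.getElem_map]
  rw [e1, h]

-- setting at a position not among js commutes past writeAll
theorem writeAll_set_comm (js : List Nat) : ∀ (ws : List Char) (st : List Char)
    (j : Nat) (w : Char), j ∉ js →
    writeAll (st.set j w) js ws = (writeAll st js ws).set j w := by
  induction js with
  | nil => intro ws st j w _; cases ws <;> rfl
  | cons j' js' ih =>
    intro ws st j w hj
    cases ws with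
    | nil => rfl
    | cons w' ws' =>
      have hne : j ≠ j' := fun h => hj (h ▸ List.mem_cons_self)
      simp only [writeAll]
      rw [List.set_comm _ _ hne, ih ws' _ j w (fun h => hj (List.mem_cons_of_mem _ h))]

theorem writeAll_append (js : List Nat) : ∀ (ws : List Char) (st : List Char)
    (j : Nat) (w : Char), js.length = ws.length →
    writeAll st (js ++ [j]) (ws ++ [w]) = (writeAll st js ws).set j w := by
  induction js with
  | nil =>
    intro ws st j w hlen
    cases ws with
    | nil => rfl
    | cons _ _ => simp at hlen
  | cons j' js' ih =>
    intro ws st j w hlen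
    cases ws with
    | nil => simp at hlen
    | cons w' ws' =>
      simp only [List.cons_append, writeAll]
      exact ih ws' _ j w (by simpa using hlen)

theorem writeAll_map_succ (js : List Nat) : ∀ (ws : List Char) (x : Char) (xs : List Char),
    writeAll (x :: xs) (js.map (· + 1)) ws = x :: writeAll xs js ws := by
  induction js with
  | nil => intro ws x xs; cases ws <;> rfl
  | cons j js' ih =>
    intro ws x xs
    cases ws with
    | nil => rfl
    | cons w ws' => simp only [List.map_cons, writeAll, List.set_cons_succ]; exact ih ws' x _

theorem writeAll_eq_fillVowels (l : List Char) : ∀ (ws : List Char),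
    ws.length = (vidx l).length →
    writeAll l (vidx l) ws = fillVowels l ws := by
  induction l with
  | nil => intro ws _; cases ws <;> rfl
  | cons c cs ih =>
    intro ws hlen
    simp only [vidx] at hlen ⊢
    by_cases h : c ∈ pyVoyelles
    · simp only [h, if_pos] at hlen ⊢
      cases ws with
      | nil => simp at hlen
      | cons w wt =>
        simp only [writeAll, fillVowels, h, if_pos, List.set_cons_zero]
        rw [writeAll_map_succ, ih wt (by simpa using hlen)]
    · simp only [h, if_neg, ite_false, fillVowels] at hlen ⊢
      rw [writeAll_map_succ, ih ws (by simpa using hlen)]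

-- elements of (V.drop 1).take m are strictly below V[m+1]
theorem not_mem_take_drop (V : List Nat) (hp : V.Pairwise (· < ·)) (m : Nat)
    (hm : m + 1 < V.length) : V.getD (m + 1) 0 ∉ (V.drop 1).take m := by
  intro hmem
  rcases List.mem_iff_getElem.mp hmem with ⟨i, hi, hEq⟩
  have hi' : i < m := by
    have := hi; simp [List.length_take, List.length_drop] at this; omega
  have hi2 : i + 1 < V.length := by omega
  have hgt : ((V.drop 1).take m)[i] = V[i + 1] := by
    rw [List.getElem_take, List.getElem_drop]; congr 1; omega
  have hlt : V[i + 1] < V[m + 1] := (List.pairwise_iff_getElem.mp hp) _ _ _ _ (by omega)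
  rw [hgt] at hEq
  rw [List.getD_eq_getElem _ _ hm] at hEq
  omega

-- the backward cascade, reading through the current state, equals the forward writeAll
-- with values taken from the original list
theorem cascade_eq_writeAll (V : List Nat) (vals : List Char)
    (hp : V.Pairwise (· < ·)) (hlen : vals.length = V.length) : ∀ (m : Nat) (st : List Char),
    m + 1 ≤ V.length →
    (∀ k, k < m → st.getD (V.getD k 0) ' ' = vals.getD k ' ') →
    (List.range m).foldr
      (fun k st => st.set (V.getD (k + 1) 0) (st.getD (V.getD k 0) ' ')) st
    = writeAll st ((V.drop 1).take m) (vals.take m) := by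
  intro m
  induction m with
  | zero => intro st _ _; rfl
  | succ m ih =>
    intro st hm hread
    have hpg := List.pairwise_iff_getElem.mp hp
    have hmV : m + 1 < V.length := hm
    rw [List.range_succ, List.foldr_append]
    simp only [List.foldr_cons, List.foldr_nil]
    rw [hread m (by omega)]
    set st' := st.set (V.getD (m + 1) 0) (vals.getD m ' ') with hst'
    have hread' : ∀ k, k < m → st'.getD (V.getD k 0) ' ' = vals.getD k ' ' := by
      intro k hk
      have hkV : k < V.length := by omega
      have hne : V.getD (m + 1) 0 ≠ V.getD k 0 := by
        rw [List.getD_eq_getElem _ _ hmV, List.getD_eq_getElem _ _ hkV]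
        have := hpg k (m + 1) hkV hmV (by omega)
        omega
      rw [hst', List.getD_eq_getElem?_getD, List.getElem?_set_ne hne,
        ← List.getD_eq_getElem?_getD]
      exact hread k (by omega)
    rw [ih st' (by omega) hread']
    have hdm : m < (V.drop 1).length := by simp; omega
    have hgd : (V.drop 1)[m] = V.getD (m + 1) 0 := by
      rw [List.getElem_drop, List.getD_eq_getElem _ _ hmV]
      congr 1
      omega
    have htakeJ : (V.drop 1).take (m + 1) = (V.drop 1).take m ++ [V.getD (m + 1) 0] := by
      rw [List.take_add_one, List.getElem?_eq_getElem hdm, hgd]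
      rfl
    have hmv : m < vals.length := by omega
    have htakeW : vals.take (m + 1) = vals.take m ++ [vals.getD m ' '] := by
      rw [List.take_add_one, List.getElem?_eq_getElem hmv, List.getD_eq_getElem _ _ hmv]
      rfl
    rw [htakeJ, htakeW,
      writeAll_append _ _ _ _ _ (by simp; omega),
      writeAll_set_comm _ _ _ _ _ (not_mem_take_drop V hp m hmV)]

-- getD on the Nat→Int-cast index list (defaults line up: 0 = ↑0)
theorem getD_map_cast (V : List Nat) (i : Nat) :
    (V.map (fun j : Nat => (j : Int))).getD i 0 = ((V.getD i 0 : Nat) : Int) := by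
  by_cases h : i < V.length
  · rw [List.getD_eq_getElem _ _ (by simpa using h), List.getD_eq_getElem _ _ h,
      List.getElem_map]
  · rw [List.getD_eq_default _ _ (by simpa using Nat.le_of_not_lt h),
      List.getD_eq_default _ _ (Nat.le_of_not_lt h)]
    rfl

theorem pyGetD_map_cast (V : List Nat) (k : Nat) :
    PySem.List.pyGetD (V.map (fun j : Nat => (j : Int))) (k : Int) 0
      = ((V.getD k 0 : Nat) : Int) := by
  rw [PySem.List.pyGetD_natCast, getD_map_cast]

theorem getLastD_eq_getD (vals : List Char) (h : vals ≠ []) :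
    vals.getLastD ' ' = vals.getD (vals.length - 1) ' ' := by
  rw [List.getLastD_eq_getLast?, List.getLast?_eq_getElem?, ← List.getD_eq_getElem?_getD]

-- the whole nonempty branch, at the level of character lists
theorem branch_eq (l : List Char) (hK : (vidx l).length ≠ 0) :
    PySem.List.pySetD
      ((PySem.List.pyRange ((((vidx l).map (fun j : Nat => (j : Int))).length : Int) - 2) (-1) (-1)).foldl
        (fun le ind =>
          PySem.List.pySetD le
            (PySem.List.pyGetD ((vidx l).map (fun j : Nat => (j : Int))) (ind + 1) 0)
            (PySem.List.pyGetD le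
              (PySem.List.pyGetD ((vidx l).map (fun j : Nat => (j : Int))) ind 0) ' ')) l)
      (PySem.List.pyGetD ((vidx l).map (fun j : Nat => (j : Int))) 0 0)
      (PySem.List.pyGetD l
        (PySem.List.pyGetD ((vidx l).map (fun j : Nat => (j : Int))) (-1) 0) ' ')
    = fillVowels l
        ((l.filter (· ∈ pyVoyelles)).getLastD ' ' :: (l.filter (· ∈ pyVoyelles)).dropLast) := by
  have hlenvals : (l.filter (· ∈ pyVoyelles)).length = (vidx l).length := (length_vidx l).symm
  have hp := vidx_pairwise l
  have hvne : l.filter (· ∈ pyVoyelles) ≠ [] := by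
    intro h; rw [h] at hlenvals; simp at hlenvals; omega
  -- the loop
  have hloop :
      (PySem.List.pyRange ((((vidx l).map (fun j : Nat => (j : Int))).length : Int) - 2) (-1) (-1)).foldl
        (fun le ind =>
          PySem.List.pySetD le
            (PySem.List.pyGetD ((vidx l).map (fun j : Nat => (j : Int))) (ind + 1) 0)
            (PySem.List.pyGetD le
              (PySem.List.pyGetD ((vidx l).map (fun j : Nat => (j : Int))) ind 0) ' ')) l
      = writeAll l (((vidx l).drop 1).take ((vidx l).length - 1))
          ((l.filter (· ∈ pyVoyelles)).take ((vidx l).length - 1)) := by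
    rw [List.length_map, PySem.List.pyRange_neg_one_eq_reverse]
    have h0 : (-1 : Int) + 1 = 0 := by norm_num
    have h1 : ((vidx l).length : Int) - 2 + 1 = (((vidx l).length - 1 : Nat) : Int) := by omega
    rw [h0, h1, PySem.List.pyRange_zero_natCast, List.foldl_reverse, List.foldr_map]
    have hbody : (fun (x : Nat) (y : List Char) =>
        PySem.List.pySetD y
          (PySem.List.pyGetD ((vidx l).map (fun j : Nat => (j : Int))) ((x : Int) + 1) 0)
          (PySem.List.pyGetD y
            (PySem.List.pyGetD ((vidx l).map (fun j : Nat => (j : Int))) (x : Int) 0) ' '))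
        = (fun (k : Nat) (st : List Char) =>
            st.set ((vidx l).getD (k + 1) 0) (st.getD ((vidx l).getD k 0) ' ')) := by
      funext k st
      have hcast : ((k : Int) + 1) = ((k + 1 : Nat) : Int) := by push_cast; ring
      rw [hcast, pyGetD_map_cast, pyGetD_map_cast, PySem.List.pySetD_natCast,
        PySem.List.pyGetD_natCast]
    rw [hbody]
    exact cascade_eq_writeAll (vidx l) (l.filter (· ∈ pyVoyelles)) hp hlenvals
      ((vidx l).length - 1) l (by omega)
      (fun k hk => getD_vidx_getD l k (by omega))
  rw [hloop]
  -- saturated takes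
  rw [List.take_of_length_le (by simp),
    show ((l.filter (· ∈ pyVoyelles)).take ((vidx l).length - 1))
        = (l.filter (· ∈ pyVoyelles)).dropLast by
      rw [List.dropLast_eq_take, hlenvals]]
  -- final write
  have hvidxne : vidx l ≠ [] := by intro h; rw [h] at hK; exact hK rfl
  have hmapne : (vidx l).map (fun j : Nat => (j : Int)) ≠ [] := by
    simpa [List.map_eq_nil_iff] using hvidxne
  have hK1 : (vidx l).length - 1 < (vidx l).length := by omega
  have hlast :
      PySem.List.pyGetD l
        (PySem.List.pyGetD ((vidx l).map (fun j : Nat => (j : Int))) (-1) 0) ' '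
      = (l.filter (· ∈ pyVoyelles)).getLastD ' ' := by
    rw [PySem.List.pyGetD_neg_one _ 0 hmapne, List.getLast_eq_getElem]
    have hidx : ((vidx l).map (fun j : Nat => (j : Int)))[((vidx l).map (fun j : Nat => (j : Int))).length - 1]'(by rw [List.length_map]; exact hK1)
        = (((vidx l).getD ((vidx l).length - 1) 0 : Nat) : Int) := by
      simp [List.getElem_map]
      rw [List.getElem?_eq_getElem hK1]
      rfl
    rw [hidx, PySem.List.pyGetD_natCast, getD_vidx_getD l _ hK1,
      getLastD_eq_getD _ hvne, hlenvals]
  rw [hlast, PySem.List.pyGetD_zero, getD_map_cast, PySem.List.pySetD_natCast]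
  -- turn B's refill into the same sequence of writes
  have hlenrot : ((l.filter (· ∈ pyVoyelles)).getLastD ' '
      :: (l.filter (· ∈ pyVoyelles)).dropLast).length = (vidx l).length := by
    simp [List.length_dropLast, hlenvals]
    omega
  rw [← writeAll_eq_fillVowels l _ hlenrot]
  obtain ⟨v0, Vt, hV⟩ : ∃ v0 Vt, vidx l = v0 :: Vt := by
    cases h : vidx l with
    | nil => exact absurd h hvidxne
    | cons a b => exact ⟨a, b, rfl⟩
  have hv0 : v0 ∉ Vt := by
    intro hmem
    have := (List.pairwise_cons.mp (hV ▸ hp)).1 v0 hmem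
    omega
  rw [hV]
  simp only [writeAll, List.getD_cons_zero, List.drop_succ_cons, List.drop_zero]
  rw [writeAll_set_comm _ _ _ _ _ hv0]

theorem shift_vowels_right_eq (entry : String) :
    shift_vowels_right entry = shift_vowels_right_alt entry := by
  simp only [shift_vowels_right, shift_vowels_right_alt]
  rw [enumerate_foldl_vidx entry.toList 0 []]
  simp only [List.nil_append]
  have hz : (vidx entry.toList).map (fun j : Nat => (0 : Int) + (j : Int))
      = (vidx entry.toList).map (fun j : Nat => (j : Int)) := by
    refine List.map_congr_left ?_
    intro j _
    ring
  rw [hz]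
  by_cases hK : (vidx entry.toList).length = 0
  · have hfil : entry.toList.filter (· ∈ pyVoyelles) = [] := by
      have h := length_vidx entry.toList
      rw [hK] at h
      exact List.length_eq_zero_iff.mp h.symm
    simp [hK, hfil]
  · have hfil : ¬ (entry.toList.filter (· ∈ pyVoyelles) = []) := by
      intro h
      have hlen := length_vidx entry.toList
      rw [h] at hlen
      exact hK (hlen.trans List.length_nil)
    rw [if_neg (by simpa using hK), if_neg hfil]
    exact congrArg String.mk (branch_eq entry.toList hK)

-- ===== VERDICT (by name: the statement is the Claim_ definition above) =====
theorem shift_vowels_right_spec : Claim_equal_shift_vowels_right := by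
  intro entry _
  unfold Spec_shift_vowels_right
  exact shift_vowels_right_eq entry
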